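-- pv_equiv track=rewrite | github.com/yusf1013/covid-result-prediction | temp.py | insert_in_array
-- ===== SOURCE A (Python) =====
-- def insert_in_array(array, element, nn):
--     if len(array) < nn:
--         array.append(element)
--         return True
--
--     for i in range(len(array)):
--         item = array[i]
--         if item["d"] > element["d"]:
--             array.insert(i, element)
--             array.pop(len(array) - 1)
--             return True
--     return False
-- ===== SOURCE B (Python) =====
-- import bisect
--
-- def insert_in_array(array, element, nn):
--     if len(array) < nn:
--         array.append(element)
--         return True
--     keys = [x["d"] for x in array]
--     pos = bisect.bisect_right(keys, element["d"])
--     if pos == len(array):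
--         return False
--     array.insert(pos, element)
--     array.pop()
--     return True
-- ===== Notes on version B (the rewrite author's own statement) =====
-- stated objective: idiomatic
-- what changed: Replaces the linear first-item-greater scan with a key list plus bisect.bisect_right binary search; pos == len(array) replaces the fall-through return False.
-- outside the precondition, e.g. on insert_in_array([{'d': 5}, {'x': 1}], {'d': 0}, 1): A returns True, B raises KeyError; on insert_in_array([], {}, 0): A returns False, B raises KeyError; on insert_in_array([{'d': 5}, {'d': 0}], {'d': 1}, 1): A returns True, B returns False
import Mathlib
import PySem

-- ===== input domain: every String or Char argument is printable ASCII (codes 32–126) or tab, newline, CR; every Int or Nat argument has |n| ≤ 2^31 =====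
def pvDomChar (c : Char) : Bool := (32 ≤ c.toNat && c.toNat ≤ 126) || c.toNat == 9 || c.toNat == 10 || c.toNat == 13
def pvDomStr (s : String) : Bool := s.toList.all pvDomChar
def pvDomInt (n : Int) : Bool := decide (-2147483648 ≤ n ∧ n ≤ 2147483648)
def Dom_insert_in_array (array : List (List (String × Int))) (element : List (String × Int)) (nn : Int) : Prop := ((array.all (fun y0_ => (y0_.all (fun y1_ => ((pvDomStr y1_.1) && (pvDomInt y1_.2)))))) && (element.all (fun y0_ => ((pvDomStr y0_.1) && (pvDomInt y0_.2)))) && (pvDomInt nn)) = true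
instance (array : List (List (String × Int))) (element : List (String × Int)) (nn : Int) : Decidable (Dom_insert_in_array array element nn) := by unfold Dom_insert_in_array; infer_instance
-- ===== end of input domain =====

-- B replaces A's linear scan with bisect_right on the extracted key list (idiomatic, not faster);
-- equivalence is about the RETURN value only (both Pythons also mutate `array` in place, in the same way on Pre_).


-- d["d"]: the Python dict value for key "d"; the default 0 is only reachable on inputs
-- where the Python raises KeyError, which Pre_insert_in_array excludes.
def pyKeyD (d : List (String × Int)) : Int := (PySem.Dict.ofList d).getD "d" 0

-- ===== PORT A =====
-- A's for-loop over range(len(array)): first item with item["d"] > element["d"] → True, fall through → False.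
def insert_in_array_go (ed : Int) : List (List (String × Int)) → Bool
  | [] => false
  | item :: rest => if pyKeyD item > ed then true else insert_in_array_go ed rest

def insert_in_array (array : List (List (String × Int))) (element : List (String × Int)) (nn : Int) : Bool :=
  if (array.length : Int) < nn then true
  else insert_in_array_go (pyKeyD element) array

-- ===== PORT B =====
def insert_in_array_alt (array : List (List (String × Int))) (element : List (String × Int)) (nn : Int) : Bool :=
  if (array.length : Int) < nn then true
  else
    let keys := array.map pyKeyD
    let pos := PySem.List.bisectRight keys (pyKeyD element)
    if pos = array.length then false else true

-- ===== PRECONDITION & SPEC =====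
-- Pre_ excludes inputs where len(array) ≥ nn and either a consulted dict lacks key "d" (A may return
-- where B raises KeyError) or the array is not sorted by "d" (bisect's contract; both answers defensible).
def Pre_insert_in_array (array : List (List (String × Int))) (element : List (String × Int)) (nn : Int) : Prop :=
  (array.length : Int) < nn ∨
    ((∀ item ∈ array, (PySem.Dict.ofList item).contains "d" = true) ∧
     (PySem.Dict.ofList element).contains "d" = true ∧
     (array.map pyKeyD).Pairwise (· ≤ ·))
instance (array : List (List (String × Int))) (element : List (String × Int)) (nn : Int) : Decidable (Pre_insert_in_array array element nn) := by unfold Pre_insert_in_array; infer_instance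

def pvWitness_insert_in_array : (List (List (String × Int))) × (List (String × Int)) × Int :=
  ([[("d", 1)], [("d", 3)]], [("d", 2)], 2)

def Spec_insert_in_array (array : List (List (String × Int))) (element : List (String × Int)) (nn : Int) (out : Bool) : Prop := out = insert_in_array_alt array element nn
instance (array : List (List (String × Int))) (element : List (String × Int)) (nn : Int) (out : Bool) : Decidable (Spec_insert_in_array array element nn out) := by unfold Spec_insert_in_array; infer_instance

-- ===== CLAIM (what is proved, stated in full; the proofs are below) =====
def Claim_equal_insert_in_array : Prop := ∀ (array : List (List (String × Int))) (element : List (String × Int)) (nn : Int), Dom_insert_in_array array element nn → Pre_insert_in_array array element nn → Spec_insert_in_array array element nn (insert_in_array array element nn)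

-- ===== LEMMAS AND PROOFS =====
lemma insert_in_array_go_eq_any (ed : Int) (l : List (List (String × Int))) :
    insert_in_array_go ed l = l.any (fun item => decide (ed < pyKeyD item)) := by
  induction l with
  | nil => rfl
  | cons a t ih =>
    by_cases h : pyKeyD a > ed <;> simp [insert_in_array_go, h, ih]

-- ===== VERDICT (by name: the statement is the Claim_ definition above) =====
theorem insert_in_array_spec : Claim_equal_insert_in_array := by
  intro array element nn _hdom hpre
  unfold Spec_insert_in_array insert_in_array insert_in_array_alt
  by_cases hlt : (array.length : Int) < nn
  · simp [hlt]
  · simp only [hlt, if_false]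
    rcases hpre with h | ⟨_, _, hsorted⟩
    · exact absurd h hlt
    · set ed := pyKeyD element with hed
      obtain ⟨hle, hbelow, habove⟩ := PySem.List.bisectRight_spec (array.map pyKeyD) ed hsorted
      rw [List.length_map] at hle
      set pos := PySem.List.bisectRight (array.map pyKeyD) ed with hpos
      rw [insert_in_array_go_eq_any]
      by_cases hend : pos = array.length
      · simp only [hend, if_true]
        rw [List.any_eq_false]
        intro item hmem
        obtain ⟨j, hj, rfl⟩ := List.mem_iff_getElem.mp hmem
        have := hbelow j (by simpa using hj) (by omega)
        simp only [List.getElem_map] at this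
        simp only [decide_eq_true_eq]
        omega
      · simp only [if_neg hend]
        have hposlt : pos < array.length := lt_of_le_of_ne hle hend
        rw [List.any_eq_true]
        refine ⟨array[pos], List.getElem_mem _, ?_⟩
        have := habove pos (by simpa using hposlt) le_rfl
        simp only [List.getElem_map] at this
        simpa using this
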